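-- pv_equiv track=rewrite | github.com/codinggeninus/codingtest | 2024-04-08/김지헌/2805.py | cut_trees
-- ===== SOURCE A (Python) =====
-- def cut_trees(N, M, heights):
--     start = 0  # 절단기 높이의 최솟값
--     end = max(heights)  # 절단기 높이의 최댓값
--     result = 0
--
--     while start <= end:
--         mid = (start + end) // 2  # 절단기 높이의 중간값
--
--         total_length = 0
--         for height in heights:
--             if height > mid:
--                 total_length += height - mid
--
--         # 적어도 M미터의 나무를 가져갈 수 있는 경우
--         if total_length >= M:
--             result = mid
--             start = mid + 1  # 높이를 높여 더 많이 잘라냄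
--         else:
--             end = mid - 1  # 높이를 낮춰 더 적게 잘라냄
--
--     return result
-- ===== SOURCE B (Python) =====
-- def cut_trees(N, M, heights):
--     s = sorted(heights)
--     n = len(s)
--     # suf[j] = sum of the j largest heights (the last j entries of s)
--     suf = [0]
--     for h in reversed(s):
--         suf.append(suf[-1] + h)
--     start, end, result = 0, s[-1], 0
--     while start <= end:
--         mid = (start + end) // 2
--         # lo = number of trees with height <= mid (binary search on sorted s)
--         lo, hi = 0, n
--         while lo < hi:
--             m2 = (lo + hi) // 2
--             if s[m2] <= mid:
--                 lo = m2 + 1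
--             else:
--                 hi = m2
--         total = suf[n - lo] - (n - lo) * mid
--         if total >= M:
--             result = mid
--             start = mid + 1
--         else:
--             end = mid - 1
--     return result
-- ===== Notes on version B (the rewrite author's own statement) =====
-- stated objective: alternative
-- what changed: B sorts the heights once and precomputes a suffix-sum array, so each binary-search step evaluates the harvested total by an inner bisection plus a constant-number-of-operations formula instead of A's scan over all trees; measured runtime is comparable (the sort dominates), so no speed is claimed.
import Mathlib
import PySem

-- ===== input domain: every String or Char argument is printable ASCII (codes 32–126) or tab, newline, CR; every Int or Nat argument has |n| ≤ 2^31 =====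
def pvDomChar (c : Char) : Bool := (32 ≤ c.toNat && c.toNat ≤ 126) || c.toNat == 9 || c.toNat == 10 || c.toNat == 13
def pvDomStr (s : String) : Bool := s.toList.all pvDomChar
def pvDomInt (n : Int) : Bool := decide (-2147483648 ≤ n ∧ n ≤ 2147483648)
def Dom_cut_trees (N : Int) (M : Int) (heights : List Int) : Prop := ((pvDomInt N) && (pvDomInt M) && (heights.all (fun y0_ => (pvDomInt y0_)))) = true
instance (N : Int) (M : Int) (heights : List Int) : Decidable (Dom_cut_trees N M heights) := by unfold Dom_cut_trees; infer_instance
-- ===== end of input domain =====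

-- B evaluates each binary-search step via a one-time sort + suffix-sum array and an inner bisection
-- instead of A's per-step scan over all trees; the outer start/end/result control flow is identical to A's.

-- ===== PORT A =====
def pvLoopA (M : Int) (heights : List Int) (start e result : Int) : Int :=
  if hle : start ≤ e then
    let mid := PySem.Int.floordiv (start + e) 2
    let total := heights.foldl (fun acc h => if h > mid then acc + (h - mid) else acc) 0
    if total ≥ M then pvLoopA M heights (mid + 1) e mid
    else pvLoopA M heights start (mid - 1) result
  else result
termination_by (e - start + 1).toNat
decreasing_by
  · have := PySem.Int.floordiv_two_mid_bounds hle; omega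
  · have := PySem.Int.floordiv_two_mid_bounds hle; omega

def cut_trees (N : Int) (M : Int) (heights : List Int) : Int :=
  match PySem.List.max? heights (fun y => y) with
  | none => 0       -- max([]) raises ValueError: outside Pre_
  | some e => pvLoopA M heights 0 e 0

-- ===== PORT B =====
-- suffix-sum array (python: suf = [0]; for h in reversed(s): suf.append(suf[-1] + h))
def pvSuf (s : List Int) : List Int :=
  s.reverse.foldl (fun acc h => acc ++ [(PySem.List.pyGet? acc (-1)).getD 0 + h]) [0]

-- inner while-loop: number of entries of the sorted list that are <= mid
def pvBisect (s : List Int) (mid lo hi : Int) : Int :=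
  if hlt : lo < hi then
    let m2 := PySem.Int.floordiv (lo + hi) 2
    if (PySem.List.pyGet? s m2).getD 0 ≤ mid then pvBisect s mid (m2 + 1) hi
    else pvBisect s mid lo m2
  else lo
termination_by (hi - lo).toNat
decreasing_by
  · have := PySem.Int.floordiv_two_mid_bounds (le_of_lt hlt); omega
  · have h2 := (PySem.Int.floordiv_lt_iff_lt_mul (a := lo + hi) (b := 2) (q := hi) (by omega)).2 (by omega)
    have := PySem.Int.floordiv_two_mid_bounds (le_of_lt hlt); omega

-- outer while-loop of B over state (start, end, result)
def pvLoopB (M : Int) (s suf : List Int) (n : Int) (start e result : Int) : Int :=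
  if hle : start ≤ e then
    let mid := PySem.Int.floordiv (start + e) 2
    let lo := pvBisect s mid 0 n
    let total := (PySem.List.pyGet? suf (n - lo)).getD 0 - (n - lo) * mid
    if total ≥ M then pvLoopB M s suf n (mid + 1) e mid
    else pvLoopB M s suf n start (mid - 1) result
  else result
termination_by (e - start + 1).toNat
decreasing_by
  · have := PySem.Int.floordiv_two_mid_bounds hle; omega
  · have := PySem.Int.floordiv_two_mid_bounds hle; omega

def cut_trees_alt (N : Int) (M : Int) (heights : List Int) : Int :=
  let s := PySem.List.sorted heights (fun y => y) false
  let n : Int := (s.length : Int)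
  let suf := pvSuf s
  match PySem.List.pyGet? s (-1) with
  | none => 0       -- s[-1] raises IndexError: outside Pre_
  | some last => pvLoopB M s suf n 0 last 0

-- ===== PRECONDITION & SPEC =====
-- Pre_ excludes only the empty list, on which A raises ValueError (max() of an empty sequence).
def Pre_cut_trees (N : Int) (M : Int) (heights : List Int) : Prop := heights ≠ []
instance (N : Int) (M : Int) (heights : List Int) : Decidable (Pre_cut_trees N M heights) := by unfold Pre_cut_trees; infer_instance

def pvWitness_cut_trees : Int × Int × List Int := (4, 7, [20, 15, 10, 17])

def Spec_cut_trees (N : Int) (M : Int) (heights : List Int) (out : Int) : Prop := out = cut_trees_alt N M heights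
instance (N : Int) (M : Int) (heights : List Int) (out : Int) : Decidable (Spec_cut_trees N M heights out) := by unfold Spec_cut_trees; infer_instance

-- ===== CLAIM (what is proved, stated in full; the proofs are below) =====
def Claim_equal_cut_trees : Prop := ∀ (N : Int) (M : Int) (heights : List Int), Dom_cut_trees N M heights → Pre_cut_trees N M heights → Spec_cut_trees N M heights (cut_trees N M heights)

-- ===== LEMMAS AND PROOFS =====
theorem pvSuf_cons (h : Int) (t : List Int) :
    pvSuf (h :: t) = pvSuf t ++ [(PySem.List.pyGet? (pvSuf t) (-1)).getD 0 + h] := by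
  simp only [pvSuf, List.reverse_cons, List.foldl_append, List.foldl_cons, List.foldl_nil]

theorem pvSuf_eq : ∀ s : List Int, pvSuf s = (s.tails.map List.sum).reverse
  | [] => by simp [pvSuf]
  | h :: t => by
    rw [pvSuf_cons, pvSuf_eq t, PySem.List.pyGet?_neg_one, List.getLast?_reverse]
    have hh : t.tails.head? = some t := by cases t <;> simp [List.tails]
    simp [hh]
    omega

theorem sorted_le_iff : ∀ (s : List Int), s.Pairwise (· ≤ ·) → ∀ (mid : Int) (i : Nat) (hi : i < s.length),
    (s[i] ≤ mid ↔ i < s.countP (fun x => decide (x ≤ mid)))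
  | [], _, mid, i, hi => absurd hi (by simp)
  | h :: t, hp, mid, i, hi => by
    rcases List.pairwise_cons.1 hp with ⟨hht, hpt⟩
    by_cases hh : h ≤ mid
    · cases i with
      | zero => simp [List.countP_cons, hh]
      | succ j =>
        have := sorted_le_iff t hpt mid j (by simpa using hi)
        simp only [List.getElem_cons_succ, List.countP_cons, hh, decide_true, if_true]
        constructor
        · intro hle; have h2 := this.1 hle; omega
        · intro hlt; exact this.2 (by omega)
    · have hct : t.countP (fun x => decide (x ≤ mid)) = 0 :=
        List.countP_eq_zero.2 (fun x hx => by
          simp only [decide_eq_true_eq]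
          exact not_le.2 (lt_of_lt_of_le (not_le.1 hh) (hht x hx)))
      have hc0 : List.countP (fun x => decide (x ≤ mid)) (h :: t) = 0 := by
        simp [List.countP_cons, hct, hh]
      rw [hc0]
      cases i with
      | zero => simp [hh]
      | succ j =>
        simp only [List.getElem_cons_succ]
        constructor
        · intro hle
          exact absurd (lt_of_lt_of_le (not_le.1 hh) (hht _ (List.getElem_mem _))) (not_lt.2 hle)
        · omega
theorem pvBisect_eq (s : List Int) (mid : Int) (c : Nat)
    (hchar : ∀ (i : Nat) (hi : i < s.length), (s[i] ≤ mid ↔ i < c)) (hcn : c ≤ s.length) :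
    ∀ (fuel : Nat) (lo hi : Int), (hi - lo).toNat ≤ fuel → 0 ≤ lo → lo ≤ (c : Int) →
      (c : Int) ≤ hi → hi ≤ (s.length : Int) → pvBisect s mid lo hi = (c : Int) := by
  intro fuel
  induction fuel with
  | zero =>
    intro lo hi hf h0 hlc hch hhn
    rw [pvBisect]
    rw [dif_neg (by omega)]
    omega
  | succ k ih =>
    intro lo hi hf h0 hlc hch hhn
    rw [pvBisect]
    by_cases hlt : lo < hi
    · simp only [dif_pos hlt]
      have hmb := PySem.Int.floordiv_two_mid_bounds (le_of_lt hlt)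
      have hms : PySem.Int.floordiv (lo + hi) 2 < hi :=
        (PySem.Int.floordiv_lt_iff_lt_mul (a := lo + hi) (b := 2) (q := hi) (by omega)).2 (by omega)
      set m2 := PySem.Int.floordiv (lo + hi) 2 with hm2
      have hmn : m2.toNat < s.length := by omega
      have hget : PySem.List.pyGet? s m2 = some s[m2.toNat] :=
        PySem.List.pyGet?_eq_some_getElem s (by omega) (by push_cast; omega)
      rw [hget]
      have hch2 := hchar m2.toNat hmn
      by_cases hc : s[m2.toNat] ≤ mid
      · rw [if_pos (by simpa using hc)]
        exact ih (m2 + 1) hi (by omega) (by omega) (by have := hch2.1 hc; omega) (by omega) (by omega)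
      · rw [if_neg (by simpa using hc)]
        have : ¬ m2.toNat < c := fun hlt' => hc (hch2.2 hlt')
        exact ih lo m2 (by omega) (by omega) (by omega) (by omega) (by omega)
    · rw [dif_neg hlt]; omega
theorem all_gt_sum (mid : Int) : ∀ t : List Int, (∀ x ∈ t, mid < x) →
    (t.map (fun h => if h > mid then h - mid else 0)).sum = t.sum - (t.length : Int) * mid
  | [], _ => by simp
  | h :: t, hall => by
    have ih := all_gt_sum mid t (fun x hx => hall x (List.mem_cons_of_mem _ hx))
    simp only [List.map_cons, List.sum_cons, ih, if_pos (hall h (List.mem_cons_self)),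
      List.length_cons]
    push_cast
    ring
theorem total_eq_sum (mid : Int) : ∀ s : List Int, s.Pairwise (· ≤ ·) →
    (s.drop (s.countP (fun x => decide (x ≤ mid)))).sum
      - ((s.length : Int) - (s.countP (fun x => decide (x ≤ mid)) : Int)) * mid
    = (s.map (fun h => if h > mid then h - mid else 0)).sum
  | [], _ => by simp
  | h :: t, hp => by
    rcases List.pairwise_cons.1 hp with ⟨hht, hpt⟩
    have ih := total_eq_sum mid t hpt
    by_cases hh : h ≤ mid
    · have hc : List.countP (fun x => decide (x ≤ mid)) (h :: t)
          = List.countP (fun x => decide (x ≤ mid)) t + 1 := by simp [List.countP_cons, hh]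
      rw [hc]
      simp only [List.drop_succ_cons, List.map_cons, List.sum_cons, if_neg (by omega : ¬ h > mid)]
      rw [← ih]
      simp only [List.length_cons]
      push_cast
      ring
    · have hgt : ∀ x ∈ h :: t, mid < x := by
        intro x hx
        rcases List.mem_cons.1 hx with rfl | hx
        · omega
        · exact lt_of_lt_of_le (by omega) (hht x hx)
      have hc : List.countP (fun x => decide (x ≤ mid)) (h :: t) = 0 := by
        apply List.countP_eq_zero.2
        intro x hx
        simpa using not_le.2 (hgt x hx)
      rw [hc, List.drop_zero, all_gt_sum mid _ hgt]
      push_cast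
      ring
theorem step_total_eq (heights : List Int) (mid : Int) :
    (PySem.List.pyGet? (pvSuf (PySem.List.sorted heights (fun y => y) false))
        (((PySem.List.sorted heights (fun y => y) false).length : Int)
          - pvBisect (PySem.List.sorted heights (fun y => y) false) mid 0
              ((PySem.List.sorted heights (fun y => y) false).length : Int))).getD 0
      - (((PySem.List.sorted heights (fun y => y) false).length : Int)
          - pvBisect (PySem.List.sorted heights (fun y => y) false) mid 0
              ((PySem.List.sorted heights (fun y => y) false).length : Int)) * mid
    = heights.foldl (fun acc h => if h > mid then acc + (h - mid) else acc) 0 := by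
  set s := PySem.List.sorted heights (fun y => y) false with hs
  have hpair : s.Pairwise (· ≤ ·) := PySem.List.sorted_pairwise heights (fun y => y)
  set c := s.countP (fun x => decide (x ≤ mid)) with hcdef
  have hcn : c ≤ s.length := List.countP_le_length
  have hbis : pvBisect s mid 0 (s.length : Int) = (c : Int) :=
    pvBisect_eq s mid c (fun i hi => sorted_le_iff s hpair mid i hi) hcn
      ((s.length : Int) - 0).toNat 0 (s.length : Int) (by omega) (by omega)
      (by exact_mod_cast Int.ofNat_le.2 (Nat.zero_le c)) (by exact_mod_cast hcn) (by omega)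
  rw [hbis]
  -- suffix-sum lookup: suf[(n - c)] = (s.drop c).sum
  have hlen : (pvSuf s).length = s.length + 1 := by
    rw [pvSuf_eq]; simp
  have hidx : ((s.length : Int) - (c : Int)).toNat = s.length - c := by omega
  have hget : PySem.List.pyGet? (pvSuf s) ((s.length : Int) - (c : Int))
      = some ((s.drop c).sum) := by
    rw [PySem.List.pyGet?_eq_some_getElem (pvSuf s) (by omega) (by rw [hlen]; push_cast; omega)]
    congr 1
    rw [List.getElem_of_eq (pvSuf_eq s)]
    have h1 : ((s.length : Int) - (c : Int)).toNat < (s.tails.map List.sum).reverse.length := by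
      simp only [List.length_reverse, List.length_map, List.length_tails]; omega
    rw [List.getElem_reverse]
    have h2 : (s.tails.map List.sum).length - 1 - ((s.length : Int) - (c : Int)).toNat = c := by
      simp [hidx]; omega
    simp only [h2]
    rw [List.getElem_map, List.getElem_tails]
  rw [hget]
  simp only [Option.getD_some]
  -- now use total_eq_sum and the permutation
  have hperm : s.Perm heights := PySem.List.sorted_perm heights (fun y => y) false
  have hfold : (fun (acc : Int) (h : Int) => if h > mid then acc + (h - mid) else acc)
      = (fun acc h => acc + (if h > mid then h - mid else 0)) := by
    funext a b; by_cases hb : b > mid <;> simp [hb]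
  rw [hfold, PySem.List.foldl_add, zero_add, ← (hperm.map _).sum_eq, ← total_eq_sum mid s hpair]
theorem loops_eq (M : Int) (heights : List Int) :
    ∀ (fuel : Nat) (start e result : Int), (e - start + 1).toNat ≤ fuel →
      pvLoopA M heights start e result
        = pvLoopB M (PySem.List.sorted heights (fun y => y) false)
            (pvSuf (PySem.List.sorted heights (fun y => y) false))
            ((PySem.List.sorted heights (fun y => y) false).length : Int) start e result := by
  intro fuel
  induction fuel with
  | zero =>
    intro start e result hf
    rw [pvLoopA, pvLoopB]
    rw [dif_neg (by omega), dif_neg (by omega)]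
  | succ k ih =>
    intro start e result hf
    rw [pvLoopA, pvLoopB]
    by_cases hle : start ≤ e
    · simp only [dif_pos hle]
      rw [step_total_eq heights (PySem.Int.floordiv (start + e) 2)]
      have hmb := PySem.Int.floordiv_two_mid_bounds hle
      by_cases ht : heights.foldl
          (fun acc h => if h > PySem.Int.floordiv (start + e) 2
            then acc + (h - PySem.Int.floordiv (start + e) 2) else acc) 0 ≥ M
      · rw [if_pos ht, if_pos ht]
        exact ih _ _ _ (by omega)
      · rw [if_neg ht, if_neg ht]
        exact ih _ _ _ (by omega)
    · rw [dif_neg hle, dif_neg hle]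
theorem sorted_le_getLast : ∀ (s : List Int), s.Pairwise (· ≤ ·) → ∀ (hne : s ≠ []) (x : Int), x ∈ s → x ≤ s.getLast hne
  | [], _, hne, _, _ => absurd rfl hne
  | h :: t, hp, hne, x, hx => by
    rcases List.pairwise_cons.1 hp with ⟨hht, hpt⟩
    cases t with
    | nil => simp at hx ⊢; omega
    | cons a t' =>
      rw [List.getLast_cons (by simp)]
      rcases List.mem_cons.1 hx with rfl | hx'
      · exact le_trans (hht _ (List.getLast_mem (by simp))) (le_refl _)
      · exact sorted_le_getLast (a :: t') hpt (by simp) x hx'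
theorem max_eq_last (heights : List Int) (h : heights ≠ []) :
    PySem.List.max? heights (fun y => y)
      = PySem.List.pyGet? (PySem.List.sorted heights (fun y => y) false) (-1) := by
  set s := PySem.List.sorted heights (fun y => y) false with hs
  have hperm : s.Perm heights := PySem.List.sorted_perm heights (fun y => y) false
  have hsne : s ≠ [] := by
    intro h0
    rw [h0] at hperm
    exact h (List.Perm.eq_nil hperm.symm)
  have hpair : s.Pairwise (· ≤ ·) := PySem.List.sorted_pairwise heights (fun y => y)
  rw [PySem.List.pyGet?_neg_one, List.getLast?_eq_getLast_of_ne_nil hsne]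
  cases hm : PySem.List.max? heights (fun y => y) with
  | none => exact absurd ((PySem.List.max?_eq_none_iff _ _).1 hm) h
  | some m =>
    congr 1
    have hmmem : m ∈ heights := PySem.List.max?_mem hm
    have hmax : ∀ y ∈ heights, y ≤ m := PySem.List.max?_isMax hm
    have h1 : s.getLast hsne ≤ m := hmax _ (hperm.mem_iff.1 (List.getLast_mem hsne))
    have h2 : m ≤ s.getLast hsne := sorted_le_getLast s hpair hsne m (hperm.mem_iff.2 hmmem)
    omega

-- ===== VERDICT (by name: the statement is the Claim_ definition above) =====
theorem cut_trees_spec : Claim_equal_cut_trees := by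
  intro N M heights _ hpre
  unfold Spec_cut_trees cut_trees cut_trees_alt
  rw [max_eq_last heights hpre]
  cases hm : PySem.List.pyGet? (PySem.List.sorted heights (fun y => y) false) (-1) with
  | none => simp only [hm]
  | some last =>
    simp only [hm]
    exact loops_eq M heights (last - 0 + 1).toNat 0 last 0 (by omega)
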